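-- pv_equiv track=rewrite | github.com/Adhamhuss/python-exam | empty.py | english_to_morse_code
-- ===== SOURCE A (Python) =====
-- morse_code = {'A': '.-', 'B': '-...', 'C': '-.-.', 'D': '-..', 'E': '.', 'F': '..-.', 'G': '--.', 'H': '....', 'I': '..', 'J': '.---', 'K': '-.-', 'L': '.-..', 'M': '--', 'N': '-.', 'O': '---', 'P': '.--.', 'Q': '--.-', 'R': '.-.', 'S': '...', 'T': '-', 'U': '..-', 'V': '...-', 'W': '.--', 'X': '-..-', 'Y': '-.--', 'Z': '--..', '0': '-----', '1': '.----', '2': '..---', '3': '...--', '4': '....-', '5': '.....', '6': '-....', '7': '--...', '8': '---..', '9': '----.'}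
--
-- def english_to_morse_code(text):
--     morse_code_text = ''
--     for char in text:
--         if char.upper() in morse_code:
--             morse_code_text += morse_code[char.upper()] + ' '
--         else:
--             morse_code_text += char
--     return morse_code_text
-- ===== SOURCE B (Python) =====
-- # Letter codes A..Z packed as integers: a leading 1 marker followed by the
-- # symbol bits (0 = dot, 1 = dash).  Codes are COMPUTED per character, not
-- # looked up in a string table: letters by bit-decoding, digits by the
-- # arithmetic dots/dashes rule.
-- _LETTER_BITS = [5, 24, 26, 12, 2, 18, 14, 16, 4, 23, 13, 20, 7, 6, 15, 22,
--                 29, 10, 8, 3, 9, 17, 11, 25, 27, 28]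
--
--
-- def _code(ch):
--     if 'a' <= ch <= 'z' or 'A' <= ch <= 'Z':
--         v = _LETTER_BITS[(ord(ch) | 32) - 97]
--         out = ''
--         while v > 1:
--             out = ('-' if v & 1 else '.') + out
--             v >>= 1
--         return out + ' '
--     if '0' <= ch <= '9':
--         d = ord(ch) - 48
--         return ''.join('.' if (1 <= d <= 5 and i < d) or (d >= 6 and i >= d - 5)
--                        else '-' for i in range(5)) + ' '
--     return ch
--
--
-- def english_to_morse_code(text):
--     return ''.join(map(_code, text))
-- ===== Notes on version B (the rewrite author's own statement) =====
-- stated objective: alternative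
-- what changed: Instead of a dict lookup per uppercased character, B computes each code: letters are bit-decoded from 26 packed integers (leading-1 marker, 0=dot/1=dash) and digits are generated by the arithmetic dots-then-dashes rule; the result is assembled with join(map(...)).
import Mathlib
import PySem

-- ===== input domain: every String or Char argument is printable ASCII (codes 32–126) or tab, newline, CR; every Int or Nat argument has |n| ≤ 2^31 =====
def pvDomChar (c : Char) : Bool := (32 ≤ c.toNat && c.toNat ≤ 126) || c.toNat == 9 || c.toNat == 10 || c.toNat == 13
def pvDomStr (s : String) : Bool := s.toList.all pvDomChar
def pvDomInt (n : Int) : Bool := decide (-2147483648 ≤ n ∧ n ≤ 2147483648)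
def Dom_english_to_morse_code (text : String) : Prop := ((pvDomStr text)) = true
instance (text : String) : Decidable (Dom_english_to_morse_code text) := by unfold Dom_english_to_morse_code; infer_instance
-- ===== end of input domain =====

-- B computes each Morse code (letters bit-decoded from packed integers, digits by the
-- arithmetic dots/dashes rule) instead of looking codes up in a dict; same result.


-- ===== PORT A =====
-- Port of A: per-character loop, uppercase lookup in the Morse dict, append code + ' ' or the char.
def pvMorseCode : PySem.Dict Char (List Char) :=
  PySem.Dict.ofList [('A', ".-".toList), ('B', "-...".toList), ('C', "-.-.".toList), ('D', "-..".toList), ('E', ".".toList), ('F', "..-.".toList), ('G', "--.".toList), ('H', "....".toList), ('I', "..".toList), ('J', ".---".toList), ('K', "-.-".toList), ('L', ".-..".toList), ('M', "--".toList), ('N', "-.".toList), ('O', "---".toList), ('P', ".--.".toList), ('Q', "--.-".toList), ('R', ".-.".toList), ('S', "...".toList), ('T', "-".toList), ('U', "..-".toList), ('V', "...-".toList), ('W', ".--".toList), ('X', "-..-".toList), ('Y', "-.--".toList), ('Z', "--..".toList), ('0', "-----".toList), ('1', ".----".toList), ('2', "..---".toList), ('3', "...--".toList), ('4', "....-".toList),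 ('5', ".....".toList), ('6', "-....".toList), ('7', "--...".toList), ('8', "---..".toList), ('9', "----.".toList)]

def english_to_morse_code (text : String) : String :=
  String.mk (text.toList.foldl (fun acc c =>
    if pvMorseCode.contains (PySem.Chars.upperChar c) then
      acc ++ pvMorseCode.getD (PySem.Chars.upperChar c) [] ++ [' ']
    else acc ++ [c]) [])

-- ===== PORT B =====
-- Letter codes A..Z packed as integers: leading 1 marker, then bits 0 = dot / 1 = dash.
def pvLetterBits : List Nat :=
  [5, 24, 26, 12, 2, 18, 14, 16, 4, 23, 13, 20, 7, 6, 15, 22, 29, 10, 8, 3, 9, 17, 11, 25, 27, 28]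

-- The while loop 'while v > 1: out = sym + out; v >>= 1' of Source B; fuel = v makes the
-- recursion structural (the loop runs at most log2 v ≤ v times), the computation is identical.
def pvDecode : Nat → Nat → List Char
  | 0, _ => []
  | fuel + 1, v =>
      if v > 1 then pvDecode fuel (v / 2) ++ [if v % 2 == 1 then '-' else '.'] else []

-- Source B's _code helper: compute the code of one character.
def pvCode (c : Char) : List Char :=
  if ('a' ≤ c && c ≤ 'z') || ('A' ≤ c && c ≤ 'Z') then
    pvDecode (pvLetterBits.getD ((c.toNat ||| 32) - 97) 0)
             (pvLetterBits.getD ((c.toNat ||| 32) - 97) 0) ++ [' ']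
  else if '0' ≤ c && c ≤ '9' then
    ((List.range 5).map (fun i =>
      let d := c.toNat - 48
      if (1 ≤ d && d ≤ 5 && i < d) || (6 ≤ d && d - 5 ≤ i) then '.' else '-')) ++ [' ']
  else [c]

def english_to_morse_code_alt (text : String) : String :=
  String.mk (text.toList.flatMap pvCode)

-- ===== PRECONDITION & SPEC =====
def Spec_english_to_morse_code (text : String) (out : String) : Prop := out = english_to_morse_code_alt text
instance (text : String) (out : String) : Decidable (Spec_english_to_morse_code text out) := by unfold Spec_english_to_morse_code; infer_instance

-- ===== CLAIM (what is proved, stated in full; the proofs are below) =====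
def Claim_equal_english_to_morse_code : Prop := ∀ (text : String), Dom_english_to_morse_code text → Spec_english_to_morse_code text (english_to_morse_code text)

-- ===== LEMMAS AND PROOFS =====

-- Per-character agreement between A's step and B's computed code, for every domain
-- character, by enumerating the character codes 9..126.
set_option maxRecDepth 16384 in
theorem pv_step_eq_ofNat : ∀ n : Nat, 9 ≤ n → n ≤ 126 →
    (if pvMorseCode.contains (PySem.Chars.upperChar (Char.ofNat n)) then
      pvMorseCode.getD (PySem.Chars.upperChar (Char.ofNat n)) [] ++ [' ']
    else [Char.ofNat n])
    = pvCode (Char.ofNat n) := by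
  intro n h1 h2
  interval_cases n <;> decide

theorem pv_step_eq (c : Char) (h : pvDomChar c = true) :
    (if pvMorseCode.contains (PySem.Chars.upperChar c) then
      pvMorseCode.getD (PySem.Chars.upperChar c) [] ++ [' ']
    else [c])
    = pvCode c := by
  have hb : 9 ≤ c.toNat ∧ c.toNat ≤ 126 := by
    simp [pvDomChar] at h; omega
  have hc : Char.ofNat c.toNat = c := Char.ofNat_toNat c
  rw [← hc]
  exact pv_step_eq_ofNat c.toNat hb.1 hb.2

-- ===== VERDICT (by name: the statement is the Claim_ definition above) =====
theorem english_to_morse_code_spec : Claim_equal_english_to_morse_code := by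
  intro text hdom
  unfold Spec_english_to_morse_code english_to_morse_code english_to_morse_code_alt
  have hmem : ∀ c ∈ text.toList, pvDomChar c = true := by
    intro c hc
    exact List.all_eq_true.mp hdom c hc
  congr 1
  have h1 : List.foldl (fun acc c =>
        if pvMorseCode.contains (PySem.Chars.upperChar c) = true then
          acc ++ pvMorseCode.getD (PySem.Chars.upperChar c) [] ++ [' ']
        else acc ++ [c]) [] text.toList
      = List.foldl (fun acc c => acc ++ pvCode c) [] text.toList := by
    apply PySem.List.foldl_congr_mem
    intro acc c hc
    rw [← pv_step_eq c (hmem c hc)]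
    split <;> simp
  rw [h1, PySem.List.foldl_append_eq_flatMap]
  simp
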